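-- pv_equiv track=rewrite | github.com/arod40/compbio-hic-cnn | app/utils.py | get_negative_pairs_from_list_of_bio_replicates
-- ===== SOURCE A (Python) =====
-- from collections import defaultdict
-- from itertools import combinations, product
--
-- def create_bio_replicate_to_experiment_dict(
--     experiment_to_cell_type,
--     experiment_to_bio_replicate,
--     cell_type,
--     use_experiments=None,
-- ):
--     bio_replicate_to_experiment = defaultdict(list)
--     for exp in experiment_to_cell_type:
--         if use_experiments is not None and exp not in use_experiments:
--             continue
--
--         if experiment_to_cell_type[exp] == cell_type:
--             bio_replicate_to_experiment[experiment_to_bio_replicate[exp]].append(exp)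
--     return bio_replicate_to_experiment
--
-- def get_negative_pairs_from_list_of_bio_replicates(
--     experiment_to_cell_type,
--     experiment_to_bio_replicate,
--     cell_types,
--     bio_replicates,
--     use_experiments=None,
-- ):
--     negative_pairs = []
--     for cell_type in cell_types:
--         bio_replicate_to_experiment = create_bio_replicate_to_experiment_dict(
--             experiment_to_cell_type,
--             experiment_to_bio_replicate,
--             cell_type,
--             use_experiments=use_experiments,
--         )
--
--         for i, j in combinations(bio_replicates, 2):
--             exps1 = bio_replicate_to_experiment[i]
--             exps2 = bio_replicate_to_experiment[j]
--             for exp1, exp2 in product(exps1, exps2):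
--                 negative_pairs.append((exp1, exp2))
--     return negative_pairs
-- ===== SOURCE B (Python) =====
-- def _pairs_from_rows(rows):
--     # emit, for every row and each strictly later row, their full cartesian product
--     out = []
--     while rows:
--         head = rows[0]
--         rows = rows[1:]
--         for later in rows:
--             for e1 in head:
--                 for e2 in later:
--                     out.append((e1, e2))
--     return out
--
--
-- def get_negative_pairs_from_list_of_bio_replicates(
--     experiment_to_cell_type,
--     experiment_to_bio_replicate,
--     cell_types,
--     bio_replicates,
--     use_experiments=None,
-- ):
--     # one grouping pass over the experiments, bucketed by cell type then bio replicate
--     wanted = set(cell_types)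
--     allowed = None if use_experiments is None else set(use_experiments)
--     buckets = {}
--     for exp, cell_type in experiment_to_cell_type.items():
--         if allowed is not None and exp not in allowed:
--             continue
--         if cell_type in wanted:
--             buckets.setdefault(cell_type, {}).setdefault(
--                 experiment_to_bio_replicate[exp], []
--             ).append(exp)
--
--     negative_pairs = []
--     for cell_type in cell_types:
--         by_br = buckets.get(cell_type, {})
--         negative_pairs += _pairs_from_rows([by_br.get(br, []) for br in bio_replicates])
--     return negative_pairs
-- ===== Notes on version B (the rewrite author's own statement) =====
-- stated objective: faster
-- what changed: B makes one grouping pass over the experiments into nested buckets cell_type->bio_replicate->experiments and then emits pairs with a suffix walk over the per-replicate rows, instead of A's rebuilding a bio_replicate->experiments dict from scratch for every cell type and folding over itertools.combinations; intended as faster (one pass instead of one per cell type), measured 8x at the largest size both finished.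
import Mathlib
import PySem

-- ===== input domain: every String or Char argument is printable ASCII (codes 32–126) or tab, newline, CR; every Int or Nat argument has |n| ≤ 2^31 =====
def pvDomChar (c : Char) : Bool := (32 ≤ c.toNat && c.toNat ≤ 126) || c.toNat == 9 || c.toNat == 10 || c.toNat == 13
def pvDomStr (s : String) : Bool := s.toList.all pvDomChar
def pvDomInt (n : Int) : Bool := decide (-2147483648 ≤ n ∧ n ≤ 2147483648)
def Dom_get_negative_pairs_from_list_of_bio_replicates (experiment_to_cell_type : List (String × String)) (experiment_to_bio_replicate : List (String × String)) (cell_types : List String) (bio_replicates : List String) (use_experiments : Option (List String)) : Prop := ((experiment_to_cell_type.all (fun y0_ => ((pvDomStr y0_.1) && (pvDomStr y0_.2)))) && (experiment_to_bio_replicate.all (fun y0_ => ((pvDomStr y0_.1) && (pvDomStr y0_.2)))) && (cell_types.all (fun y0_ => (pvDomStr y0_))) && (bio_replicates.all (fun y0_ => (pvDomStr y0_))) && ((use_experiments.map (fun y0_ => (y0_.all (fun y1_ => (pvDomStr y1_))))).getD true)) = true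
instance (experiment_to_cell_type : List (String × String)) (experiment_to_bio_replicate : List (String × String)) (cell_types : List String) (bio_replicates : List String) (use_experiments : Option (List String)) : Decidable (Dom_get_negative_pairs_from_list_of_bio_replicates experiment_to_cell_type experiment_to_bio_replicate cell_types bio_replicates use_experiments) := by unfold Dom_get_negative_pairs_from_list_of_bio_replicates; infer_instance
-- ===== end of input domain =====

-- ===== PORT A =====
-- B replaces A's per-cell-type rebuilding of the bio_replicate->experiments dict and its fold
-- over itertools.combinations by one nested-bucket grouping pass plus a suffix walk over the
-- per-replicate rows; intended as faster (one pass instead of one per cell type; the timing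
-- run measured B 8x faster at the largest size both finished).

-- the filter line 'use_experiments is not None and exp not in use_experiments'
def pvSkip (use_experiments : Option (List String)) (exp : String) : Bool :=
  match use_experiments with
  | some u => !(u.contains exp)
  | none => false

-- create_bio_replicate_to_experiment_dict: 'for exp in experiment_to_cell_type: …'
def pvA_brDict (ectd : PySem.Dict String String) (brd : PySem.Dict String String)
    (cell_type : String) (use_experiments : Option (List String)) : PySem.Dict String (List String) :=
  ectd.keys.foldl (fun d exp =>
    if pvSkip use_experiments exp then d
    else if ectd.getD exp "" == cell_type then
      match brd.get? exp with
      | some br => d.modify br [] (fun l => l ++ [exp])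
      | none => d      -- KeyError in Python; excluded by Pre_
    else d) PySem.Dict.empty

def get_negative_pairs_from_list_of_bio_replicates (experiment_to_cell_type : List (String × String)) (experiment_to_bio_replicate : List (String × String)) (cell_types : List String) (bio_replicates : List String) (use_experiments : Option (List String)) : List (String × String) :=
  let ectd := PySem.Dict.ofList experiment_to_cell_type
  let brd := PySem.Dict.ofList experiment_to_bio_replicate
  cell_types.foldl (fun acc cell_type =>
    let d := pvA_brDict ectd brd cell_type use_experiments
    (PySem.List.combinations bio_replicates 2).foldl (fun acc2 p =>
      match p with
      | [i, j] => acc2 ++ (d.getD i []).flatMap (fun e1 => (d.getD j []).map (fun e2 => (e1, e2)))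
      | _ => acc2) acc) []

-- ===== PORT B =====
-- _pairs_from_rows: the while loop with the running output list 'out'
def pvB_pairsFromRows (rows : List (List String)) (out : List (String × String)) : List (String × String) :=
  match rows with
  | [] => out
  | head :: rest =>
      pvB_pairsFromRows rest
        (out ++ rest.flatMap (fun later => head.flatMap (fun e1 => later.map (fun e2 => (e1, e2)))))

-- the one grouping pass: 'for exp, cell_type in experiment_to_cell_type.items(): …'
def pvB_buckets (items : List (String × String)) (brd : PySem.Dict String String)
    (wanted : PySem.Set String) (allowed : Option (PySem.Set String)) :
    PySem.Dict String (PySem.Dict String (List String)) :=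
  items.foldl (fun buckets pr =>
    if (match allowed with | some a => !(a.contains pr.1) | none => false) then buckets
    else if wanted.contains pr.2 then
      -- experiment_to_bio_replicate[exp]: none = KeyError in Python; excluded by Pre_
      (brd.get? pr.1).elim buckets (fun br =>
        buckets.modify pr.2 PySem.Dict.empty (fun inner => inner.modify br [] (fun l => l ++ [pr.1])))
    else buckets) PySem.Dict.empty

def get_negative_pairs_from_list_of_bio_replicates_alt (experiment_to_cell_type : List (String × String)) (experiment_to_bio_replicate : List (String × String)) (cell_types : List String) (bio_replicates : List String) (use_experiments : Option (List String)) : List (String × String) :=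
  let buckets := pvB_buckets (PySem.Dict.ofList experiment_to_cell_type).items
    (PySem.Dict.ofList experiment_to_bio_replicate)
    (PySem.Set.ofList cell_types) (use_experiments.map PySem.Set.ofList)
  cell_types.foldl (fun negative_pairs cell_type =>
    let by_br := buckets.getD cell_type PySem.Dict.empty
    negative_pairs ++ pvB_pairsFromRows (bio_replicates.map (fun br => by_br.getD br [])) []) []

-- ===== PRECONDITION & SPEC =====
-- Pre_ excludes exactly the inputs on which the Python A raises KeyError: an experiment that
-- passes the use_experiments filter, whose cell type is in cell_types, but which is missing
-- from experiment_to_bio_replicate.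
def Pre_get_negative_pairs_from_list_of_bio_replicates (experiment_to_cell_type : List (String × String)) (experiment_to_bio_replicate : List (String × String)) (cell_types : List String) (bio_replicates : List String) (use_experiments : Option (List String)) : Prop :=
  ∀ p ∈ (PySem.Dict.ofList experiment_to_cell_type).items,
    (match use_experiments with
     | some u => u.contains p.1
     | none => true) = true →
    p.2 ∈ cell_types →
    (PySem.Dict.ofList experiment_to_bio_replicate).contains p.1 = true
instance (experiment_to_cell_type : List (String × String)) (experiment_to_bio_replicate : List (String × String)) (cell_types : List String) (bio_replicates : List String) (use_experiments : Option (List String)) : Decidable (Pre_get_negative_pairs_from_list_of_bio_replicates experiment_to_cell_type experiment_to_bio_replicate cell_types bio_replicates use_experiments) := by unfold Pre_get_negative_pairs_from_list_of_bio_replicates; infer_instance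

def pvWitness_get_negative_pairs_from_list_of_bio_replicates : (List (String × String)) × (List (String × String)) × List String × List String × Option (List String) :=
  ([("e1", "x"), ("e2", "x")], [("e1", "a"), ("e2", "b")], ["x"], ["a", "b"], none)

def Spec_get_negative_pairs_from_list_of_bio_replicates (experiment_to_cell_type : List (String × String)) (experiment_to_bio_replicate : List (String × String)) (cell_types : List String) (bio_replicates : List String) (use_experiments : Option (List String)) (out : List (String × String)) : Prop := out = get_negative_pairs_from_list_of_bio_replicates_alt experiment_to_cell_type experiment_to_bio_replicate cell_types bio_replicates use_experiments
instance (experiment_to_cell_type : List (String × String)) (experiment_to_bio_replicate : List (String × String)) (cell_types : List String) (bio_replicates : List String) (use_experiments : Option (List String)) (out : List (String × String)) : Decidable (Spec_get_negative_pairs_from_list_of_bio_replicates experiment_to_cell_type experiment_to_bio_replicate cell_types bio_replicates use_experiments out) := by unfold Spec_get_negative_pairs_from_list_of_bio_replicates; infer_instance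

-- ===== CLAIM (what is proved, stated in full; the proofs are below) =====
def Claim_equal_get_negative_pairs_from_list_of_bio_replicates : Prop := ∀ (experiment_to_cell_type : List (String × String)) (experiment_to_bio_replicate : List (String × String)) (cell_types : List String) (bio_replicates : List String) (use_experiments : Option (List String)), Dom_get_negative_pairs_from_list_of_bio_replicates experiment_to_cell_type experiment_to_bio_replicate cell_types bio_replicates use_experiments → Pre_get_negative_pairs_from_list_of_bio_replicates experiment_to_cell_type experiment_to_bio_replicate cell_types bio_replicates use_experiments → Spec_get_negative_pairs_from_list_of_bio_replicates experiment_to_cell_type experiment_to_bio_replicate cell_types bio_replicates use_experiments (get_negative_pairs_from_list_of_bio_replicates experiment_to_cell_type experiment_to_bio_replicate cell_types bio_replicates use_experiments)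

-- ===== LEMMAS AND PROOFS =====

-- Bucket invariant: for a cell type ct in cell_types, looking br up under ct in B's nested
-- one-pass buckets equals looking br up in A's per-cell-type dict, when both folds run over
-- the same item list with A reading each item's cell type as p.2.
theorem pv_bucket_inv (brd : PySem.Dict String String) (cell_types : List String)
    (use_experiments : Option (List String)) (ct : String) (hct : ct ∈ cell_types) :
    ∀ (l : List (String × String)) (g : PySem.Dict String (PySem.Dict String (List String)))
      (d : PySem.Dict String (List String)),
      (∀ br, (g.getD ct PySem.Dict.empty).getD br [] = d.getD br []) →
      ∀ br,
        ((l.foldl (fun buckets pr =>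
          if (match use_experiments.map PySem.Set.ofList with
              | some a => !(a.contains pr.1) | none => false) then buckets
          else if (PySem.Set.ofList cell_types).contains pr.2 then
            (brd.get? pr.1).elim buckets (fun br =>
              buckets.modify pr.2 PySem.Dict.empty (fun inner => inner.modify br [] (fun l => l ++ [pr.1])))
          else buckets) g).getD ct PySem.Dict.empty).getD br []
        = (l.foldl (fun d pr =>
            if pvSkip use_experiments pr.1 then d
            else if pr.2 == ct then
              match brd.get? pr.1 with
              | some br => d.modify br [] (fun l => l ++ [pr.1])
              | none => d
            else d) d).getD br [] := by
  intro l
  induction l with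
  | nil => intro g d hinv br; exact hinv br
  | cons pr rest ih =>
    intro g d hinv br
    simp only [List.foldl_cons]
    apply ih
    intro br'
    have hsk : (match use_experiments.map PySem.Set.ofList with
        | some a => !(a.contains pr.1) | none => false) = pvSkip use_experiments pr.1 := by
      cases use_experiments with
      | none => rfl
      | some u =>
        simp only [Option.map_some, pvSkip]
        by_cases h : pr.1 ∈ u
        · simp [PySem.Set.contains, PySem.Set.mem_ofList, h]
        · simp [PySem.Set.contains, PySem.Set.mem_ofList, h]
    rw [hsk]
    by_cases hskip : pvSkip use_experiments pr.1 = true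
    · simp [hskip, hinv br']
    · simp only [Bool.not_eq_true] at hskip
      simp only [hskip, Bool.false_eq_true, if_false]
      by_cases hc : pr.2 = ct
      · have hwanted : (PySem.Set.ofList cell_types).contains pr.2 = true := by
          simp [PySem.Set.contains, PySem.Set.mem_ofList, hc, hct]
        cases hbr : brd.get? pr.1 with
        | none => simp [hc, hinv br']
        | some b =>
          simp only [hc, beq_self_eq_true, if_true, Option.elim]
          rw [if_pos (hc ▸ hwanted), PySem.Dict.getD_modify_self, PySem.Dict.getD_modify,
            PySem.Dict.getD_modify]
          by_cases h2 : br' = b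
          · simp [h2, hinv b]
          · simp [h2, hinv br']
      · have hne : (pr.2 == ct) = false := by simpa using hc
        cases hw : (PySem.Set.ofList cell_types).contains pr.2 with
        | false => simp [hne, hinv br']
        | true =>
          cases hbr : brd.get? pr.1 with
          | none => simp [hne, hinv br']
          | some b =>
            simp only [if_true, hne, Bool.false_eq_true, if_false, Option.elim]
            rw [PySem.Dict.getD_modify]
            have hpne : ¬ (ct = pr.2) := fun h => hc h.symm
            simp [hpne, hinv br']

-- A's per-cell-type dict, rewritten as a fold over the items list reading p.2 directly.
theorem pv_brDict_items (ect : List (String × String)) (brd : PySem.Dict String String)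
    (ct : String) (use_experiments : Option (List String)) :
    pvA_brDict (PySem.Dict.ofList ect) brd ct use_experiments
      = (PySem.Dict.ofList ect).items.foldl (fun d pr =>
          if pvSkip use_experiments pr.1 then d
          else if pr.2 == ct then
            match brd.get? pr.1 with
            | some br => d.modify br [] (fun l => l ++ [pr.1])
            | none => d
          else d) PySem.Dict.empty := by
  unfold pvA_brDict
  rw [show (PySem.Dict.ofList ect).keys = (PySem.Dict.ofList ect).items.map (fun p => p.1) from rfl]
  rw [List.foldl_map]
  apply PySem.List.foldl_congr_mem
  intro d pr hpr
  have hget : (PySem.Dict.ofList ect).getD pr.1 "" = pr.2 := by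
    exact PySem.Dict.getD_of_mem_items (d := PySem.Dict.ofList ect) (k := pr.1) (v := pr.2)
      (h := by simpa using hpr) (hnd := PySem.Dict.nodup_keys_ofList ect) (d0 := "")
  simp [hget]

-- The key lookup bridge between the two groupings.
theorem pv_key (ect : List (String × String)) (brd : PySem.Dict String String)
    (cell_types : List String) (use_experiments : Option (List String)) (ct : String)
    (hct : ct ∈ cell_types) (br : String) :
    ((pvB_buckets (PySem.Dict.ofList ect).items brd (PySem.Set.ofList cell_types)
        (use_experiments.map PySem.Set.ofList)).getD ct PySem.Dict.empty).getD br []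
      = (pvA_brDict (PySem.Dict.ofList ect) brd ct use_experiments).getD br [] := by
  rw [pv_brDict_items]
  exact pv_bucket_inv brd cell_types use_experiments ct hct (PySem.Dict.ofList ect).items
    PySem.Dict.empty PySem.Dict.empty (fun _ => rfl) br

-- A's fold over combinations xs 2 equals B's suffix walk over the rows xs.map lookup.
theorem pv_pairs (d : PySem.Dict String (List String)) :
    ∀ (xs : List String) (acc : List (String × String)),
      (PySem.List.combinations xs 2).foldl (fun acc2 p =>
        match p with
        | [i, j] => acc2 ++ (d.getD i []).flatMap (fun e1 => (d.getD j []).map (fun e2 => (e1, e2)))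
        | _ => acc2) acc
      = pvB_pairsFromRows (xs.map (fun br => d.getD br [])) acc := by
  intro xs
  induction xs with
  | nil => intro acc; simp [PySem.List.combinations, pvB_pairsFromRows]
  | cons x rest ih =>
    intro acc
    rw [PySem.List.combinations_cons_succ, PySem.List.combinations_one, List.foldl_append]
    simp only [List.map_map, List.foldl_map, Function.comp]
    rw [PySem.List.foldl_append_eq_flatMap, ih]
    simp [pvB_pairsFromRows, List.flatMap_map]

-- running-accumulator form of the while loop pulls out to the front
theorem pv_pairsFromRows_acc (rows : List (List String)) :
    ∀ acc, pvB_pairsFromRows rows acc = acc ++ pvB_pairsFromRows rows [] := by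
  induction rows with
  | nil => intro acc; simp [pvB_pairsFromRows]
  | cons head rest ih =>
    intro acc
    simp only [pvB_pairsFromRows]
    rw [ih, ih ([] ++ _)]
    simp

-- ===== VERDICT (by name: the statement is the Claim_ definition above) =====
theorem get_negative_pairs_from_list_of_bio_replicates_spec : Claim_equal_get_negative_pairs_from_list_of_bio_replicates := by
  intro ect ebr cell_types bio_replicates use_experiments _ _
  unfold Spec_get_negative_pairs_from_list_of_bio_replicates
  unfold get_negative_pairs_from_list_of_bio_replicates get_negative_pairs_from_list_of_bio_replicates_alt
  simp only []
  apply PySem.List.foldl_congr_mem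
  intro acc ct hct
  rw [pv_pairs]
  have hrows : bio_replicates.map (fun br =>
      (pvA_brDict (PySem.Dict.ofList ect) (PySem.Dict.ofList ebr) ct use_experiments).getD br [])
      = bio_replicates.map (fun br =>
      ((pvB_buckets (PySem.Dict.ofList ect).items (PySem.Dict.ofList ebr)
          (PySem.Set.ofList cell_types) (use_experiments.map PySem.Set.ofList)).getD
            ct PySem.Dict.empty).getD br []) :=
    List.map_congr_left (fun br _ =>
      (pv_key ect (PySem.Dict.ofList ebr) cell_types use_experiments ct hct br).symm)
  rw [hrows, pv_pairsFromRows_acc]
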